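-- pv_equiv track=rewrite | github.com/haakensonb/advent_of_code_2018 | day_5/day_5_part_2.py | shortest_filtered_polymer
-- ===== SOURCE A (Python) =====
-- import string
--
-- def is_opposite_polarity(unit_1, unit_2):
--     if (unit_1.islower() and unit_2.isupper()):
--         if(unit_1 == unit_2.lower()):
--             return True
--     elif (unit_1.isupper() and unit_2.islower()):
--         if(unit_1.lower() == unit_2):
--             return True
--     return False
--
-- def breakdown_polymers(polymer):
--     stack = []
--
--     for unit in polymer:
--         # if there is an item on the top of the stack then pass that and the currentunit
--         # to the polarity checking function
--         if len(stack) > 0 and is_opposite_polarity(stack[-1], unit):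
--             # if the units are opposite polarities
--             stack.pop()
--         else:
--             stack.append(unit)
--
--     return stack
--
-- def shortest_filtered_polymer(polymer):
--     filtered_polymer_lengths = []
--     alpha = string.ascii_lowercase
--     for letter in alpha:
--         filtered_data = [unit for unit in polymer if unit.lower() != letter]
--         filtered_data = breakdown_polymers(filtered_data)
--         filtered_polymer_lengths.append(len(filtered_data))
--
--     return min(filtered_polymer_lengths)
-- ===== SOURCE B (Python) =====
-- import string
--
--
-- def is_opposite_polarity(unit_1, unit_2):
--     if (unit_1.islower() and unit_2.isupper()):
--         if(unit_1 == unit_2.lower()):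
--             return True
--     elif (unit_1.isupper() and unit_2.islower()):
--         if(unit_1.lower() == unit_2):
--             return True
--     return False
--
--
-- def shortest_filtered_polymer(polymer):
--     # One pass over the polymer, reacting all 26 filtered variants at once:
--     # each letter's stack is updated in place for every unit that survives
--     # that letter's filter.
--     stacks = {letter: [] for letter in string.ascii_lowercase}
--     for unit in polymer:
--         low = unit.lower()
--         for letter, stack in stacks.items():
--             if low != letter:
--                 if stack and is_opposite_polarity(stack[-1], unit):
--                     stack.pop()
--                 else:
--                     stack.append(unit)
--     return min(len(stack) for stack in stacks.values())
-- ===== Notes on version B (the rewrite author's own statement) =====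
-- stated objective: alternative
-- what changed: B makes a single pass over the polymer, maintaining all 26 per-letter reaction stacks simultaneously, instead of A's 26 separate filter-then-react passes over the whole input.
import Mathlib
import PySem

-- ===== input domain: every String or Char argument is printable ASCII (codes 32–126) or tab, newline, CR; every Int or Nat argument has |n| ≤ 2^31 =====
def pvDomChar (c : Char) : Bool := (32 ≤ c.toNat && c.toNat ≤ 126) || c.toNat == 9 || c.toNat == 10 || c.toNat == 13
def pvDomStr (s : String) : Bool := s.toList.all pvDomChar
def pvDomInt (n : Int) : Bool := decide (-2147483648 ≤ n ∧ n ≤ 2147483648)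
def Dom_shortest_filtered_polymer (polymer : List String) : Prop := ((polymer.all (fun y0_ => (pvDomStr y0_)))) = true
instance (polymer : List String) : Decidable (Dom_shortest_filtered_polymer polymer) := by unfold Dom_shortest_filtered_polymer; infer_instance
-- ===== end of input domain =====

-- ===== PORT A =====
-- Header: B reacts all 26 filtered polymer variants in one pass over the input
-- (a different decomposition of the same work); A does 26 filter-then-react passes.
-- str.islower()/str.isupper() ported by hand (exact on the ASCII domain):
-- at least one cased character and no cased character of the opposite case.
def pyStrIslower (s : String) : Bool :=
  s.toList.any (fun c => PySem.Chars.islower c) && s.toList.all (fun c => !(PySem.Chars.isupper c))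

def pyStrIsupper (s : String) : Bool :=
  s.toList.any (fun c => PySem.Chars.isupper c) && s.toList.all (fun c => !(PySem.Chars.islower c))

-- string.ascii_lowercase, iterated as 26 one-character strings
def pvAsciiLowercase : List String :=
  ["a","b","c","d","e","f","g","h","i","j","k","l","m",
   "n","o","p","q","r","s","t","u","v","w","x","y","z"]

def is_opposite_polarity (unit_1 unit_2 : String) : Bool :=
  if pyStrIslower unit_1 && pyStrIsupper unit_2 then
    (if unit_1 == PySem.Str.lower unit_2 then true else false)
  else if pyStrIsupper unit_1 && pyStrIslower unit_2 then
    (if PySem.Str.lower unit_1 == unit_2 then true else false)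
  else false

def breakdown_polymers (polymer : List String) : List String :=
  polymer.foldl (fun stack unit =>
    -- 'len(stack) > 0 and is_opposite_polarity(stack[-1], unit)'
    match stack.getLast? with
    | some top => if is_opposite_polarity top unit then stack.dropLast else stack ++ [unit]
    | none => stack ++ [unit]) []

def shortest_filtered_polymer (polymer : List String) : Int :=
  let lengths := pvAsciiLowercase.foldl (fun acc letter =>
    let filtered_data := polymer.filter (fun unit => PySem.Str.lower unit != letter)
    let filtered_data2 := breakdown_polymers filtered_data
    acc ++ [(filtered_data2.length : Int)]) []
  -- min() of the 26 collected lengths; the list is never empty, so .getD 0 is unreachable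
  (PySem.List.min? lengths (fun x => x)).getD 0

-- ===== PORT B =====
-- the inner push/pop update of one letter's stack in Source B's loop
def pvStep (stack : List String) (unit : String) : List String :=
  match stack.getLast? with
  | some top => if is_opposite_polarity top unit then stack.dropLast else stack ++ [unit]
  | none => stack ++ [unit]

def shortest_filtered_polymer_alt (polymer : List String) : Int :=
  let pairs := polymer.foldl (fun pairs unit =>
    let low := PySem.Str.lower unit
    pairs.map (fun p => (p.1, if low == p.1 then p.2 else pvStep p.2 unit)))
    (pvAsciiLowercase.map (fun letter => (letter, ([] : List String))))
  -- min() of the 26 stack lengths; the list is never empty, so .getD 0 is unreachable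
  (PySem.List.min? (pairs.map (fun p => ((p.2.length : Int)))) (fun x => x)).getD 0

-- ===== PRECONDITION & SPEC =====
def Spec_shortest_filtered_polymer (polymer : List String) (out : Int) : Prop := out = shortest_filtered_polymer_alt polymer
instance (polymer : List String) (out : Int) : Decidable (Spec_shortest_filtered_polymer polymer out) := by unfold Spec_shortest_filtered_polymer; infer_instance

-- ===== CLAIM (what is proved, stated in full; the proofs are below) =====
def Claim_equal_shortest_filtered_polymer : Prop := ∀ (polymer : List String), Dom_shortest_filtered_polymer polymer → Spec_shortest_filtered_polymer polymer (shortest_filtered_polymer polymer)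

-- ===== LEMMAS AND PROOFS =====

-- one unit appended to the input reacts as one step on the stack
theorem breakdown_append (xs : List String) (a : String) :
    breakdown_polymers (xs ++ [a]) = pvStep (breakdown_polymers xs) a := by
  simp [breakdown_polymers, List.foldl_append, pvStep]

-- a foldl that appends singletons is a map
theorem foldl_push {A B : Type} (f : A -> B) (l : List A) (acc : List B) :
    l.foldl (fun acc x => acc ++ [f x]) acc = acc ++ l.map f := by
  induction l generalizing acc with
  | nil => simp
  | cons x t ih => simp [List.foldl_cons, ih]

-- loop invariant of B: after processing u, the stack paired with letter l is
-- exactly A's breakdown of u filtered by l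
theorem alt_invariant (u : List String) :
    u.foldl (fun pairs unit =>
        let low := PySem.Str.lower unit
        pairs.map (fun p => (p.1, if low == p.1 then p.2 else pvStep p.2 unit)))
      (pvAsciiLowercase.map (fun letter => (letter, ([] : List String))))
    = pvAsciiLowercase.map (fun l =>
        (l, breakdown_polymers (u.filter (fun unit => PySem.Str.lower unit != l)))) := by
  induction u using List.reverseRecOn with
  | nil => simp [breakdown_polymers]
  | append_singleton t a ih =>
    rw [List.foldl_append, List.foldl_cons, List.foldl_nil, ih, List.map_map]
    refine List.map_congr_left (fun l _ => ?_)
    simp only [Function.comp_apply, List.filter_append]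
    by_cases h : PySem.Str.lower a == l
    · simp [List.filter, bne, h]
    · simp only [List.filter, bne, h, Bool.not_false]
      rw [breakdown_append]
      simp

-- ===== VERDICT (by name: the statement is the Claim_ definition above) =====
theorem shortest_filtered_polymer_spec : Claim_equal_shortest_filtered_polymer := by
  intro polymer _
  unfold Spec_shortest_filtered_polymer shortest_filtered_polymer shortest_filtered_polymer_alt
  rw [alt_invariant polymer, foldl_push]
  simp only [List.nil_append, List.map_map]
  rfl
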